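-- pv_equiv track=rewrite | github.com/juyeonbae/coding | 프로그래머스/2/340212. ［PCCP 기출문제］ 2번 ／ 퍼즐 게임 챌린지/［PCCP 기출문제］ 2번 ／ 퍼즐 게임 챌린지.py | solution
-- ===== SOURCE A (Python) =====
-- def solution(diffs, times, limit):
--     left, right = 1, max(diffs)  # 숙련도의 범위를 1에서 최대 난이도 값까지 설정
--
--     while left < right:
--         mid = (left + right) // 2
--         total_time = 0
--
--         for i in range(len(diffs)):
--             # 퍼즐 난이도 > mid (현재 숙련도)
--             if diffs[i] > mid:
--                 total_time += (diffs[i] - mid) * (times[i] + times[i-1]) + times[i]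
--             else:
--                 total_time += times[i]
--
--         # 퍼즐 다 푸는 시간이 limit 이하일 때
--         if total_time <= limit:
--             right = mid  # 가능한 더 낮은 level 찾기
--         else:
--             left = mid + 1  # 숙련도 부족, level을 높임
--
--     return left  # 최소한의 level
-- ===== SOURCE B (Python) =====
-- def solution(diffs, times, limit):
--     n = len(diffs)
--     # per-puzzle retry cost: times[i] + times[i-1] (Python wrap: i=0 uses times[-1])
--     costs = [times[i] + times[i - 1] for i in range(n)]
--     base = sum(times[:n])
--     pairs = sorted(zip(diffs, costs), key=lambda p: p[0])
--     # prefix sums over the sorted pairs: pc of costs, pdc of diff*cost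
--     pc = _prefix(pairs, lambda p: p[1])
--     pdc = _prefix(pairs, lambda p: p[0] * p[1])
--
--     def total(mid):
--         # first index with diff > mid (hand-written bisect_right on the sorted diffs)
--         lo, hi = 0, n
--         while lo < hi:
--             m = (lo + hi) // 2
--             if pairs[m][0] <= mid:
--                 lo = m + 1
--             else:
--                 hi = m
--         return base + (pdc[n] - pdc[lo]) - mid * (pc[n] - pc[lo])
--
--     left, right = 1, max(diffs)
--     while left < right:
--         mid = (left + right) // 2
--         if total(mid) <= limit:
--             right = mid
--         else:
--             left = mid + 1
--     return left
--
--
-- def _prefix(pairs, f):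
--     out = [0]
--     for p in pairs:
--         out.append(out[-1] + f(p))
--     return out
-- ===== Notes on version B (the rewrite author's own statement) =====
-- stated objective: alternative
-- what changed: A rescans all n puzzles to recompute the total solving time at every step of the binary search on the level; B sorts the puzzles by difficulty once, builds prefix sums of cost and diff*cost, and evaluates each candidate level with a hand-written bisect plus two prefix-sum differences instead of the rescan (measured about 1.4x at the largest size, below the 1.5x bar, so no speed is claimed).
-- outside the precondition, e.g. on solution([0, 0], [], 5): A returns 1, B raises IndexError
import Mathlib
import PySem

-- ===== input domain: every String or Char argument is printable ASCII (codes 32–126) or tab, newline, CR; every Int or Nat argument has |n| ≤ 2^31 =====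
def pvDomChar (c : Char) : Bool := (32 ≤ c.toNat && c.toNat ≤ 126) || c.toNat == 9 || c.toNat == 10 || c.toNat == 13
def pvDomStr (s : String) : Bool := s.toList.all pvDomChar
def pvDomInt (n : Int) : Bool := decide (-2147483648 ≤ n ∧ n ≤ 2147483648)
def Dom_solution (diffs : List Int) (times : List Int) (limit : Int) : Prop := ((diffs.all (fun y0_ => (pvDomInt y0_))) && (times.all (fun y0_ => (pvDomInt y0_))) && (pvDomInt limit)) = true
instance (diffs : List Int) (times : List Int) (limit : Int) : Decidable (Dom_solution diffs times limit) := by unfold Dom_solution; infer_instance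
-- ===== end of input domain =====

-- B replaces A's rescan of all puzzles at every binary-search step by a one-off sort by
-- difficulty with prefix sums, evaluating each candidate level via bisect + two prefix-sum
-- differences (an alternative algorithm; not claimed faster).

-- ===== PORT A =====

-- the inner 'for i in range(len(diffs))' accumulation of total_time for a given mid
def solA_total (diffs times : List Int) (mid : Int) : Int :=
  (PySem.List.pyRange 0 (diffs.length : Int) 1).foldl (fun total i =>
    if PySem.List.pyGetD diffs i 0 > mid then
      total + ((PySem.List.pyGetD diffs i 0 - mid) *
                 (PySem.List.pyGetD times i 0 + PySem.List.pyGetD times (i - 1) 0) +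
               PySem.List.pyGetD times i 0)
    else
      total + PySem.List.pyGetD times i 0) 0

-- the 'while left < right' binary search on the level (fuel = right - left bounds the
-- iteration count: the interval shrinks by at least 1 each pass, so fuel is never exhausted)
def solA_loop (diffs times : List Int) (limit : Int) : Nat → Int → Int → Int
  | 0, left, _ => left
  | fuel + 1, left, right =>
    if left < right then
      let mid := PySem.Int.floordiv (left + right) 2
      if solA_total diffs times mid ≤ limit then
        solA_loop diffs times limit fuel left mid
      else
        solA_loop diffs times limit fuel (mid + 1) right
    else
      left

def solution (diffs : List Int) (times : List Int) (limit : Int) : Int :=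
  -- max(diffs): ValueError on empty diffs is excluded by Pre_solution (getD 0 is unreachable there)
  solA_loop diffs times limit (((PySem.List.max? diffs (fun x => x)).getD 0 - 1).toNat) 1
    ((PySem.List.max? diffs (fun x => x)).getD 0)

-- ===== PORT B =====

-- costs = [times[i] + times[i-1] for i in range(n)]
def solB_costs (times : List Int) (n : Nat) : List Int :=
  (PySem.List.pyRange 0 (n : Int) 1).map (fun i =>
    PySem.List.pyGetD times i 0 + PySem.List.pyGetD times (i - 1) 0)

-- _prefix(pairs, f): out = [0]; for p in pairs: out.append(out[-1] + f(p))
def solB_prefix (f : Int × Int → Int) : List (Int × Int) → Int → List Int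
  | [], acc => [acc]
  | p :: ps, acc => acc :: solB_prefix f ps (acc + f p)

-- the hand-written bisect: first index lo with pairs[lo][0] > mid (fuel = hi - lo bounds it)
def solB_bisect (pairs : List (Int × Int)) (mid : Int) : Nat → Int → Int → Int
  | 0, lo, _ => lo
  | fuel + 1, lo, hi =>
    if lo < hi then
      let m := PySem.Int.floordiv (lo + hi) 2
      if (PySem.List.pyGetD pairs m (0, 0)).1 ≤ mid then
        solB_bisect pairs mid fuel (m + 1) hi
      else
        solB_bisect pairs mid fuel lo m
    else
      lo

-- total(mid) via bisect and the two prefix-sum differences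
def solB_total (base : Int) (pairs : List (Int × Int)) (pc pdc : List Int) (n mid : Int) : Int :=
  let lo := solB_bisect pairs mid n.toNat 0 n
  base + (PySem.List.pyGetD pdc n 0 - PySem.List.pyGetD pdc lo 0)
       - mid * (PySem.List.pyGetD pc n 0 - PySem.List.pyGetD pc lo 0)

-- the same outer 'while left < right' search, consulting the precomputed structure
def solB_loop (base : Int) (pairs : List (Int × Int)) (pc pdc : List Int)
    (n limit : Int) : Nat → Int → Int → Int
  | 0, left, _ => left
  | fuel + 1, left, right =>
    if left < right then
      let mid := PySem.Int.floordiv (left + right) 2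
      if solB_total base pairs pc pdc n mid ≤ limit then
        solB_loop base pairs pc pdc n limit fuel left mid
      else
        solB_loop base pairs pc pdc n limit fuel (mid + 1) right
    else
      left

def solution_alt (diffs : List Int) (times : List Int) (limit : Int) : Int :=
  let n := diffs.length
  let costs := solB_costs times n
  let base := (PySem.List.slice times none (some (n : Int))).sum
  let pairs := PySem.List.sorted (diffs.zip costs) (fun p => p.1) false
  let pc := solB_prefix (fun p => p.2) pairs 0
  let pdc := solB_prefix (fun p => p.1 * p.2) pairs 0
  solB_loop base pairs pc pdc (n : Int) limit
    (((PySem.List.max? diffs (fun x => x)).getD 0 - 1).toNat) 1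
    ((PySem.List.max? diffs (fun x => x)).getD 0)

-- ===== PRECONDITION & SPEC =====
-- Pre_ excludes empty diffs (max(diffs) raises ValueError) and times shorter than diffs, on
-- which A raises IndexError whenever the search loop runs; in the degenerate case max(diffs) ≤ 1
-- A returns 1 without ever reading times, but B reads times upfront and raises there too.
def Pre_solution (diffs : List Int) (times : List Int) (limit : Int) : Prop :=
  diffs ≠ [] ∧ diffs.length ≤ times.length
instance (diffs : List Int) (times : List Int) (limit : Int) : Decidable (Pre_solution diffs times limit) := by unfold Pre_solution; infer_instance

def pvWitness_solution : List Int × List Int × Int := ([3, 1], [2, 5], 10)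

def Spec_solution (diffs : List Int) (times : List Int) (limit : Int) (out : Int) : Prop := out = solution_alt diffs times limit
instance (diffs : List Int) (times : List Int) (limit : Int) (out : Int) : Decidable (Spec_solution diffs times limit out) := by unfold Spec_solution; infer_instance

-- ===== CLAIM (what is proved, stated in full; the proofs are below) =====
def Claim_equal_solution : Prop := ∀ (diffs : List Int) (times : List Int) (limit : Int), Dom_solution diffs times limit → Pre_solution diffs times limit → Spec_solution diffs times limit (solution diffs times limit)

-- ===== LEMMAS AND PROOFS =====

-- the per-pair contribution of retries above level mid
def pvPhi (mid : Int) (p : Int × Int) : Int := if p.1 > mid then (p.1 - mid) * p.2 else 0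

lemma pv_map_range_getD {α β : Type} [Inhabited α] (l : List α) (f : α → β) (d : α) :
    (List.range l.length).map (fun k => f (l.getD k d)) = l.map f := by
  apply List.ext_getElem
  · simp
  · intro i h1 h2
    simp [List.getD_eq_getElem?_getD, List.getElem?_eq_getElem (by simpa using h1)]

lemma pv_prefix_getD (f : Int × Int → Int) :
    ∀ (ps : List (Int × Int)) (acc : Int) (j : Nat), j ≤ ps.length →
      (solB_prefix f ps acc).getD j 0 = acc + ((ps.take j).map f).sum := by
  intro ps
  induction ps with
  | nil =>
    intro acc j hj
    have : j = 0 := by simpa using hj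
    subst this; simp [solB_prefix]
  | cons p t ih =>
    intro acc j hj
    cases j with
    | zero => simp [solB_prefix]
    | succ j =>
      have := ih (acc + f p) j (by simpa using hj)
      simp only [solB_prefix, List.getD_cons_succ, List.take_succ_cons, List.map_cons,
        List.sum_cons, this]
      ring

lemma pv_bisect_spec (ps : List (Int × Int)) (mid : Int)
    (hp : ps.Pairwise (fun a b => a.1 ≤ b.1)) :
    ∀ (fuel lo hi : Nat), hi ≤ ps.length → lo ≤ hi → hi - lo ≤ fuel →
      (∀ j : Nat, j < lo → j < ps.length → (ps.getD j (0, 0)).1 ≤ mid) →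
      (∀ j : Nat, hi ≤ j → j < ps.length → mid < (ps.getD j (0, 0)).1) →
      ∃ k : Nat, solB_bisect ps mid fuel (lo : Int) (hi : Int) = (k : Int) ∧ k ≤ ps.length ∧
        (∀ j : Nat, j < k → j < ps.length → (ps.getD j (0, 0)).1 ≤ mid) ∧
        (∀ j : Nat, k ≤ j → j < ps.length → mid < (ps.getD j (0, 0)).1) := by
  have key : ∀ i j : Nat, i ≤ j → j < ps.length →
      (ps.getD i (0, 0)).1 ≤ (ps.getD j (0, 0)).1 := by
    intro i j hij hj
    rcases eq_or_lt_of_le hij with rfl | hlt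
    · exact le_refl _
    · rw [List.getD_eq_getElem ps (0, 0) (by omega), List.getD_eq_getElem ps (0, 0) hj]
      exact List.pairwise_iff_getElem.mp hp i j (by omega) hj hlt
  intro fuel
  induction fuel with
  | zero =>
    intro lo hi hhi hlohi hfuel h1 h2
    have : lo = hi := by omega
    subst this
    exact ⟨lo, rfl, by omega, h1, h2⟩
  | succ fuel ih =>
    intro lo hi hhi hlohi hfuel h1 h2
    by_cases hlt : lo < hi
    · have hlt' : (lo : Int) < (hi : Int) := by exact_mod_cast hlt
      rw [solB_bisect]
      simp only [hlt', if_pos]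
      have hm : PySem.Int.floordiv ((lo : Int) + (hi : Int)) 2
          = (((lo + hi) / 2 : Nat) : Int) := by
        rw [PySem.Int.floordiv_eq_ediv_of_pos (by omega)]
        push_cast [Int.natCast_div]
        rfl
      set mN := (lo + hi) / 2 with hmN
      have hmlo : lo ≤ mN := by omega
      have hmhi : mN < hi := by omega
      rw [hm, PySem.List.pyGetD_natCast]
      by_cases hc : (ps.getD mN (0, 0)).1 ≤ mid
      · simp only [hc, if_pos]
        have := ih (mN + 1) hi hhi (by omega) (by omega)
          (fun j hj hjl => key j mN (by omega) (by omega) |>.trans hc)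
          h2
        simpa using this
      · simp only [hc, if_neg, not_false_iff]
        have hmid : mid < (ps.getD mN (0, 0)).1 := by omega
        exact ih lo mN (by omega) (by omega) (by omega) h1
          (fun j hj hjl => lt_of_lt_of_le hmid (key mN j hj hjl))
    · have : lo = hi := by omega
      subst this
      rw [solB_bisect]
      simp only [lt_irrefl, if_neg, not_false_iff]
      exact ⟨lo, rfl, by omega, h1, h2⟩

lemma pv_sum_split (ps : List (Int × Int)) (mid : Int) (k : Nat) (hk : k ≤ ps.length)
    (h1 : ∀ j : Nat, j < k → j < ps.length → (ps.getD j (0, 0)).1 ≤ mid)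
    (h2 : ∀ j : Nat, k ≤ j → j < ps.length → mid < (ps.getD j (0, 0)).1) :
    (ps.map (pvPhi mid)).sum
      = ((ps.map (fun p => p.1 * p.2)).sum - ((ps.take k).map (fun p => p.1 * p.2)).sum)
        - mid * ((ps.map (fun p => p.2)).sum - ((ps.take k).map (fun p => p.2)).sum) := by
  have htake : ∀ p ∈ ps.take k, p.1 ≤ mid := by
    intro p hp
    obtain ⟨j, hj, hval⟩ := List.mem_iff_getElem.mp hp
    have hjk : j < k := by have := hj; simp [List.length_take] at this; omega
    have hjl : j < ps.length := by omega
    have : (ps.take k)[j] = ps[j] := List.getElem_take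
    rw [this] at hval
    have := h1 j hjk hjl
    rw [List.getD_eq_getElem ps (0, 0) hjl, hval] at this
    exact this
  have hdrop : ∀ p ∈ ps.drop k, mid < p.1 := by
    intro p hp
    obtain ⟨j, hj, hval⟩ := List.mem_iff_getElem.mp hp
    have hjl : k + j < ps.length := by have := hj; simp [List.length_drop] at this; omega
    have : (ps.drop k)[j] = ps[k + j] := List.getElem_drop
    rw [this] at hval
    have := h2 (k + j) (by omega) hjl
    rw [List.getD_eq_getElem ps (0, 0) hjl, hval] at this
    exact this
  have hsplit : ∀ (f : Int × Int → Int),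
      (ps.map f).sum = ((ps.take k).map f).sum + ((ps.drop k).map f).sum := by
    intro f
    conv_lhs => rw [← List.take_append_drop k ps]
    rw [List.map_append, List.sum_append]
  rw [hsplit (pvPhi mid), hsplit (fun p => p.1 * p.2), hsplit (fun p => p.2)]
  have ht0 : ((ps.take k).map (pvPhi mid)).sum = 0 := by
    rw [List.map_congr_left (g := fun _ => (0 : Int))
      (fun p hp => by simp [pvPhi, not_lt_of_ge (htake p hp)])]
    simp
  have hd : ∀ l : List (Int × Int), (∀ p ∈ l, mid < p.1) →
      (l.map (pvPhi mid)).sum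
        = (l.map (fun p => p.1 * p.2)).sum - mid * (l.map (fun p => p.2)).sum := by
    intro l
    induction l with
    | nil => simp
    | cons q t iht =>
      intro hl
      have hq : mid < q.1 := hl q (by simp)
      simp only [List.map_cons, List.sum_cons, iht (fun p hp => hl p (by simp [hp]))]
      simp only [pvPhi, gt_iff_lt, hq, if_pos]
      ring
  rw [ht0, hd _ hdrop]
  ring

lemma pv_total_eq (diffs times : List Int) (hn : diffs.length ≤ times.length) (mid : Int) :
    solA_total diffs times mid
      = solB_total ((PySem.List.slice times none (some (diffs.length : Int))).sum)
          (PySem.List.sorted (diffs.zip (solB_costs times diffs.length)) (fun p => p.1) false)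
          (solB_prefix (fun p => p.2)
            (PySem.List.sorted (diffs.zip (solB_costs times diffs.length)) (fun p => p.1) false) 0)
          (solB_prefix (fun p => p.1 * p.2)
            (PySem.List.sorted (diffs.zip (solB_costs times diffs.length)) (fun p => p.1) false) 0)
          (diffs.length : Int) mid := by
  set costs := solB_costs times diffs.length with hcosts
  set pairs := diffs.zip costs with hpairs
  set sp := PySem.List.sorted pairs (fun p => p.1) false with hsp
  have hcl : costs.length = diffs.length := by
    simp [hcosts, solB_costs, PySem.List.length_pyRange_one]
  have hpl : pairs.length = diffs.length := by
    rw [hpairs, List.length_zip, hcl]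
    omega
  have hsl : sp.length = diffs.length := by
    rw [hsp, PySem.List.length_sorted, hpl]
  have hltake : (times.take diffs.length).length = diffs.length := by
    simp
    omega
  -- per-index value of the cost list
  have hcostk : ∀ k : Nat, k < diffs.length → costs.getD k 0
      = PySem.List.pyGetD times (k : Int) 0 + PySem.List.pyGetD times ((k : Int) - 1) 0 := by
    intro k hk
    rw [hcosts, solB_costs, PySem.List.pyRange_zero_nat, List.map_map]
    exact PySem.List.getD_map_range _ diffs.length k 0 hk
  -- the A-side loop as a sum over the zipped pairs plus the base time
  have hA : solA_total diffs times mid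
      = (pairs.map (pvPhi mid)).sum + (times.take diffs.length).sum := by
    rw [solA_total]
    rw [PySem.List.foldl_congr_mem _ _ (fun total i =>
      total + (pvPhi mid (PySem.List.pyGetD diffs i 0,
          PySem.List.pyGetD times i 0 + PySem.List.pyGetD times (i - 1) 0)
        + PySem.List.pyGetD times i 0)) 0
      (by
        intro acc i _
        simp only [pvPhi]
        split_ifs with h
        · ring
        · ring)]
    rw [PySem.List.foldl_add]
    rw [PySem.List.pyRange_zero_nat, List.map_map]
    rw [List.map_congr_left (g := fun k =>
        pvPhi mid (pairs.getD k (0, 0)) + (times.take diffs.length).getD k 0)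
      (by
        intro k hk
        have hkn : k < diffs.length := by simpa using hk
        have hkt : k < times.length := by omega
        have hpair : pairs.getD k (0, 0) = (diffs.getD k 0, costs.getD k 0) := by
          rw [List.getD_eq_getElem pairs (0, 0) (by omega)]
          show (diffs.zip costs)[k]'(by rw [List.length_zip, hcl]; omega) = _
          rw [List.getElem_zip]
          rw [List.getD_eq_getElem diffs 0 (by omega),
            List.getD_eq_getElem costs 0 (by omega)]
        simp only [Function.comp]
        rw [hpair, hcostk k hkn, PySem.List.pyGetD_natCast diffs k 0]
        rw [List.getD_eq_getElem (times.take diffs.length) 0 (by omega), List.getElem_take,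
          PySem.List.pyGetD_natCast times k 0, List.getD_eq_getElem times 0 hkt])]
    rw [PySem.List.sum_map_add_int, zero_add]
    congr 1
    · have h1 := pv_map_range_getD pairs (pvPhi mid) (0, 0)
      rw [hpl] at h1
      exact congrArg List.sum h1
    · have h2 := pv_map_range_getD (times.take diffs.length) (fun x => x) 0
      rw [hltake] at h2
      rw [h2, List.map_id']
  -- the B-side evaluation
  obtain ⟨k, hkeq, hkle, hk1, hk2⟩ :=
    pv_bisect_spec sp mid (PySem.List.sorted_pairwise pairs (fun p => p.1))
      diffs.length 0 diffs.length
      (by omega) (by omega) (by omega)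
      (by intro j hj _; omega)
      (by intro j hj hjl; rw [hsl] at hjl; omega)
  have hkeq' : solB_bisect sp mid ((diffs.length : Int)).toNat 0 (diffs.length : Int)
      = (k : Int) := by
    have h0 : ((0 : Nat) : Int) = (0 : Int) := by norm_num
    have h1 : ((diffs.length : Int)).toNat = diffs.length := by omega
    rw [h1, ← h0]
    exact hkeq
  have hkn : k ≤ diffs.length := by omega
  have hpdc : ∀ (f : Int × Int → Int) (j : Nat), j ≤ diffs.length →
      PySem.List.pyGetD (solB_prefix f sp 0) (j : Int) 0 = ((sp.take j).map f).sum := by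
    intro f j hj
    rw [PySem.List.pyGetD_natCast, pv_prefix_getD f sp 0 j (by omega)]
    ring
  rw [hA, solB_total]
  simp only [hkeq', hpdc _ diffs.length (le_refl _), hpdc _ k hkn]
  rw [List.take_of_length_le (le_of_eq hsl)]
  rw [PySem.List.slice_to_natCast]
  have hsum : (sp.map (pvPhi mid)).sum = (pairs.map (pvPhi mid)).sum :=
    ((PySem.List.sorted_perm pairs (fun p => p.1) false).map (pvPhi mid)).sum_eq
  rw [← hsum, pv_sum_split sp mid k (by omega) hk1 hk2]
  ring

lemma pv_loop_eq (diffs times : List Int) (limit base : Int) (pairs : List (Int × Int))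
    (pc pdc : List Int) (n : Int)
    (htot : ∀ m : Int, solA_total diffs times m = solB_total base pairs pc pdc n m) :
    ∀ (fuel : Nat) (l r : Int),
      solA_loop diffs times limit fuel l r = solB_loop base pairs pc pdc n limit fuel l r := by
  intro fuel
  induction fuel with
  | zero => intro l r; rfl
  | succ fuel ih =>
    intro l r
    rw [solA_loop, solB_loop]
    by_cases hlr : l < r
    · simp only [hlr, if_pos, htot]
      split_ifs with hc
      · exact ih l _
      · exact ih _ r
    · simp only [hlr, if_neg, not_false_iff]

-- ===== VERDICT (by name: the statement is the Claim_ definition above) =====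
theorem solution_spec : Claim_equal_solution := by
  intro diffs times limit _hdom hpre
  unfold Spec_solution solution solution_alt
  exact pv_loop_eq diffs times limit _ _ _ _ _
    (fun m => pv_total_eq diffs times hpre.2 m)
    ((((PySem.List.max? diffs (fun x => x)).getD 0) - 1).toNat) 1 _
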